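-- pv_equiv track=rewrite | github.com/alxgmpr/lutron-tools | tools/cca-tune-bench.py | extract_last_block
-- ===== SOURCE A (Python) =====
-- from typing import Dict, List, Optional, Tuple
--
-- def extract_last_block(lines: List[str], header: str) -> List[str]:
--     idx = -1
--     for i, ln in enumerate(lines):
--         if header in ln:
--             idx = i
--     if idx < 0:
--         return []
--     return lines[idx : idx + 12]
-- ===== SOURCE B (Python) =====
-- def extract_last_block(lines, header):
--     for j, ln in reversed(list(enumerate(lines))):
--         if header in ln:
--             return lines[j : j + 12]
--     return []
-- ===== Notes on version B (the rewrite author's own statement) =====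
-- stated objective: alternative
-- what changed: Replaces the forward last-wins index accumulator with a reverse scan that returns the 12-line slice at the first match seen from the end (the last occurrence), with no running state.
import Mathlib
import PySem

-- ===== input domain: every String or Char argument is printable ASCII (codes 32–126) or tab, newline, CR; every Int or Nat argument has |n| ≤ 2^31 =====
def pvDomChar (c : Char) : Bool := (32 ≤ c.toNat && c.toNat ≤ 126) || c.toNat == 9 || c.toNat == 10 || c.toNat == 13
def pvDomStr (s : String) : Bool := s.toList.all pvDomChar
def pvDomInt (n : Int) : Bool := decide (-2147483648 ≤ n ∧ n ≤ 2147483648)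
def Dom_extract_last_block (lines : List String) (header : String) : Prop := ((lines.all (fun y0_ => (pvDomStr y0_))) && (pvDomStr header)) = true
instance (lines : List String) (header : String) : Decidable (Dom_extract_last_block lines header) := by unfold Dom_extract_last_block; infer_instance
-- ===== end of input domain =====

-- B replaces A's forward last-wins index accumulator with a reverse scan returning at the first match from the end; alternative decomposition, same cost.

-- ===== PORT A =====
-- A: forward scan over enumerate, keeping the index of the LAST matching line in idx (init -1).
def extract_last_block (lines : List String) (header : String) : List String :=
  let idx : Int :=
    (PySem.List.enumerate lines 0).foldl
      (fun idx p => if PySem.Str.isIn header p.2 then p.1 else idx) (-1)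
  if idx < 0 then [] else PySem.List.slice lines (some idx) (some (idx + 12))

-- ===== PORT B =====
-- B: walk the enumerated lines in reverse; return the slice at the first match seen.
def pvAltGo (lines : List String) (header : String) : List (Int × String) → List String
  | [] => []
  | p :: rest =>
    if PySem.Str.isIn header p.2 then PySem.List.slice lines (some p.1) (some (p.1 + 12))
    else pvAltGo lines header rest

def extract_last_block_alt (lines : List String) (header : String) : List String :=
  pvAltGo lines header (PySem.List.enumerate lines 0).reverse

-- ===== PRECONDITION & SPEC =====
def Spec_extract_last_block (lines : List String) (header : String) (out : List String) : Prop := out = extract_last_block_alt lines header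
instance (lines : List String) (header : String) (out : List String) : Decidable (Spec_extract_last_block lines header out) := by unfold Spec_extract_last_block; infer_instance

-- ===== CLAIM (what is proved, stated in full; the proofs are below) =====
def Claim_equal_extract_last_block : Prop := ∀ (lines : List String) (header : String), Dom_extract_last_block lines header → Spec_extract_last_block lines header (extract_last_block lines header)

-- ===== LEMMAS AND PROOFS =====

-- The finish step F applied to A's last-match fold equals B's reverse search,
-- for any pair list with nonnegative indices.
theorem pvFold_eq_altGo (lines : List String) (header : String) :
    ∀ (ps : List (Int × String)), (∀ p ∈ ps, 0 ≤ p.1) →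
      (let idx := ps.foldl (fun idx p => if PySem.Str.isIn header p.2 then p.1 else idx) (-1)
       if idx < 0 then [] else PySem.List.slice lines (some idx) (some (idx + 12)))
        = pvAltGo lines header ps.reverse := by
  intro ps
  induction ps using List.reverseRecOn with
  | nil => intro _; simp [pvAltGo]
  | append_singleton qs q ih =>
    intro hnn
    simp only [List.foldl_append, List.foldl_cons, List.foldl_nil, List.reverse_append,
      List.reverse_cons, List.reverse_nil, List.nil_append, List.cons_append, pvAltGo]
    simp only [PySem.Str.isIn_eq]
    by_cases hq : PySem.Chars.isIn header.toList q.2.toList = true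
    · have h0 : 0 ≤ q.1 := hnn q (by simp)
      simp [hq, not_lt.mpr h0]
    · simp only [hq, if_false, Bool.false_eq_true]
      exact ih (fun p hp => hnn p (by simp [hp]))

theorem extract_last_block_spec : Claim_equal_extract_last_block := by
  intro lines header _
  unfold Spec_extract_last_block extract_last_block extract_last_block_alt
  apply pvFold_eq_altGo
  intro p hp
  rcases (PySem.List.mem_enumerate_iff _ _ _).1 hp with ⟨k, hk, rfl⟩
  simp
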